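-- pv_equiv track=rewrite | github.com/pybursa/homeworks | HOMETASKS/hw3/hw3_solution1.py | max_vowels_1
-- ===== SOURCE A (Python) =====
-- def max_vowels_1(text, vowels):
--     words = text.split()
--     text_vowels_count = []
--     for word in words:
--         word_vowels_count = 0
--         for letter in word:
--             if letter.upper() in vowels:
--                 word_vowels_count += 1
--         text_vowels_count.append(word_vowels_count)
--     return max(text_vowels_count)
-- ===== SOURCE B (Python) =====
-- def max_vowels_1(text, vowels):
--     best = None   # max vowel count over completed words; None = no word seen yet
--     cur = None    # vowel count of the word in progress; None = not inside a word
--     for ch in text: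
--         if ch.isspace():
--             if cur is not None:
--                 best = cur if best is None or best < cur else best
--                 cur = None
--         else:
--             if cur is None:
--                 cur = 0
--             if ch.upper() in vowels:
--                 cur += 1
--     if cur is not None:
--         best = cur if best is None or best < cur else best
--     if best is None:
--         raise ValueError("max() arg is an empty sequence")
--     return best
-- ===== Notes on version B (the rewrite author's own statement) =====
-- stated objective: alternative
-- what changed: Replaces split()+per-word nested loops+a counts list+max() with a single linear scan over the characters keeping two accumulators (current word's vowel count and best-so-far), no intermediate lists; Pre_ excludes whitespace-only/empty text, on which A's max([]) raises ValueError (B raises too).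
import Mathlib
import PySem

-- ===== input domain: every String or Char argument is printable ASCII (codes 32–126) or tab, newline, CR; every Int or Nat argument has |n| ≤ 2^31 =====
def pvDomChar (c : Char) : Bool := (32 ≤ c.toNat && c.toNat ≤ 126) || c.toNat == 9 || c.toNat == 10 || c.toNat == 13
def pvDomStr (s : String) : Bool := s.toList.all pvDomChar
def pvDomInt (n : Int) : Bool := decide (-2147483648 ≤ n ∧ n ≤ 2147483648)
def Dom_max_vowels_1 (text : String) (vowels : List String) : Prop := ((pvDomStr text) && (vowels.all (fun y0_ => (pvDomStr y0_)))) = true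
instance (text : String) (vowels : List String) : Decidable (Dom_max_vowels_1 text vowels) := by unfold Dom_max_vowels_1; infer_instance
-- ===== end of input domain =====

-- B replaces split()+nested loops+a counts list+max() by one linear character scan with two
-- running accumulators (alternative decomposition, same cost).

-- ===== PORT A =====
def max_vowels_1 (text : String) (vowels : List String) : Int :=
  match PySem.List.max?
      ((PySem.Str.split₀ text).foldl (fun acc word =>
        acc ++ [word.toList.foldl (fun n letter =>
          if PySem.Str.upper (String.ofList [letter]) ∈ vowels then n + 1 else n) (0 : Int)]) [])
      (fun y => y) with
  | some m => m
  | none => 0   -- Python's max([]) raises ValueError here; excluded by Pre_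

-- ===== PORT B =====
-- best = cur if best is None or best < cur else best
def pvBmax (best : Option Int) (cur : Int) : Option Int :=
  match best with
  | none => some cur
  | some b => if b < cur then some cur else some b

-- the loop body of Source B, on state (best, cur)
def pvBstep (vowels : List String) (st : Option Int × Option Int) (ch : Char) :
    Option Int × Option Int :=
  if PySem.Chars.isspace ch then
    match st.2 with
    | none => st
    | some k => (pvBmax st.1 k, none)
  else
    (st.1, some (if PySem.Str.upper (String.ofList [ch]) ∈ vowels
                 then st.2.getD 0 + 1 else st.2.getD 0))

def max_vowels_1_alt (text : String) (vowels : List String) : Int :=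
  match
    (match (text.toList.foldl (pvBstep vowels) (none, none)) with
     | (best, none) => best
     | (best, some k) => pvBmax best k) with
  | some m => m
  | none => 0   -- Source B raises ValueError here; excluded by Pre_

-- ===== PRECONDITION & SPEC =====
-- Pre_ excludes exactly empty/whitespace-only text, where text.split() is [] and A's max([]) raises ValueError.
def Pre_max_vowels_1 (text : String) (vowels : List String) : Prop :=
  text.toList.any (fun c => ¬ PySem.Chars.isspace c)
instance (text : String) (vowels : List String) : Decidable (Pre_max_vowels_1 text vowels) := by
  unfold Pre_max_vowels_1; infer_instance

def pvWitness_max_vowels_1 : String × List String := ("hello brave new world", ["A", "E", "I", "O", "U"])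

def Spec_max_vowels_1 (text : String) (vowels : List String) (out : Int) : Prop := out = max_vowels_1_alt text vowels
instance (text : String) (vowels : List String) (out : Int) : Decidable (Spec_max_vowels_1 text vowels out) := by unfold Spec_max_vowels_1; infer_instance

-- ===== CLAIM (what is proved, stated in full; the proofs are below) =====
def Claim_equal_max_vowels_1 : Prop := ∀ (text : String) (vowels : List String), Dom_max_vowels_1 text vowels → Pre_max_vowels_1 text vowels → Spec_max_vowels_1 text vowels (max_vowels_1 text vowels)

-- ===== LEMMAS AND PROOFS =====

-- vowel test shared by both Pythons (letter.upper() in vowels)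
def pvIsV (vowels : List String) (c : Char) : Bool :=
  decide (PySem.Str.upper (String.ofList [c]) ∈ vowels)

-- vowel count of a word, as a countP
def pvCnt (vowels : List String) (w : List Char) : Int :=
  ((w.countP (pvIsV vowels) : Nat) : Int)

-- the running-max step of PySem.List.max? (key = id); pvBmax b k is the same function
def pvMstep (acc : Option Int) (x : Int) : Option Int :=
  match acc with
  | none => some x
  | some m => if m < x then some x else some m

-- encode split₀.go's in-progress word as B's `cur` accumulator
def pvEnc (vowels : List String) (cur : List Char) : Option Int :=
  if cur.isEmpty then none else some (pvCnt vowels cur)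

-- flush the final state (Source B's code after the loop), at Option level
def pvFinish (st : Option Int × Option Int) : Option Int :=
  match st with
  | (best, none) => best
  | (best, some k) => pvBmax best k

lemma pvBmax_eq_mstep (b : Option Int) (k : Int) : pvBmax b k = pvMstep b k := rfl

lemma pvCnt_cons (vowels : List String) (c : Char) (w : List Char) :
    pvCnt vowels (c :: w) = (if pvIsV vowels c then pvCnt vowels w + 1 else pvCnt vowels w) := by
  simp [pvCnt, List.countP_cons]
  by_cases h : pvIsV vowels c = true <;> simp [h]

lemma pvCnt_reverse (vowels : List String) (w : List Char) :
    pvCnt vowels w.reverse = pvCnt vowels w := by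
  simp [pvCnt]

-- unfolding equations for PySem.Chars.split₀.go
lemma pvGo_nil (cur : List Char) (acc : List (List Char)) :
    PySem.Chars.split₀.go [] cur acc
      = if cur.isEmpty then acc.reverse else (cur.reverse :: acc).reverse := by
  rw [PySem.Chars.split₀.go.eq_def]

lemma pvGo_cons_space (c : Char) (cs cur : List Char) (acc : List (List Char))
    (h : PySem.Chars.isspace c = true) :
    PySem.Chars.split₀.go (c :: cs) cur acc
      = if cur.isEmpty then PySem.Chars.split₀.go cs [] acc
        else PySem.Chars.split₀.go cs [] (cur.reverse :: acc) := by
  rw [PySem.Chars.split₀.go.eq_def]; simp [h]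

lemma pvGo_cons_nonspace (c : Char) (cs cur : List Char) (acc : List (List Char))
    (h : ¬ PySem.Chars.isspace c = true) :
    PySem.Chars.split₀.go (c :: cs) cur acc = PySem.Chars.split₀.go cs (c :: cur) acc := by
  rw [PySem.Chars.split₀.go.eq_def]; simp [h]

-- the accumulator of split₀.go only prepends finished words
lemma pvGo_acc (cs : List Char) : ∀ (cur : List Char) (acc : List (List Char)),
    PySem.Chars.split₀.go cs cur acc = acc.reverse ++ PySem.Chars.split₀.go cs cur [] := by
  induction cs with
  | nil =>
    intro cur acc
    rw [pvGo_nil, pvGo_nil]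
    by_cases h : cur.isEmpty
    · rw [if_pos h, if_pos h]; simp
    · rw [if_neg h, if_neg h]; simp
  | cons c rest ih =>
    intro cur acc
    by_cases hs : PySem.Chars.isspace c
    · by_cases h : cur.isEmpty
      · rw [pvGo_cons_space c rest cur _ hs, if_pos h,
              pvGo_cons_space c rest cur _ hs, if_pos h]
        exact ih [] acc
      · rw [pvGo_cons_space c rest cur _ hs, if_neg h,
              pvGo_cons_space c rest cur _ hs, if_neg h]
        rw [ih [] (cur.reverse :: acc), ih [] [cur.reverse]]
        simp
    · rw [pvGo_cons_nonspace c rest cur _ hs, pvGo_cons_nonspace c rest cur _ hs]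
      exact ih (c :: cur) acc

-- MAIN INVARIANT: Source B's scan from state (b, enc cur) computes the running max
-- over the vowel counts of the words split₀.go will still produce.
lemma pvMain (vowels : List String) (cs : List Char) : ∀ (cur : List Char) (b : Option Int),
    pvFinish (cs.foldl (pvBstep vowels) (b, pvEnc vowels cur))
      = ((PySem.Chars.split₀.go cs cur []).map (pvCnt vowels)).foldl pvMstep b := by
  induction cs with
  | nil =>
    intro cur b
    simp only [List.foldl_nil, pvGo_nil]
    by_cases h : cur.isEmpty
    · simp [pvFinish, pvEnc, h]
    · simp [pvFinish, pvEnc, h, pvBmax_eq_mstep, pvCnt_reverse]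
  | cons c rest ih =>
    intro cur b
    by_cases hs : PySem.Chars.isspace c
    · by_cases h : cur.isEmpty
      · rw [pvGo_cons_space c rest cur _ hs, if_pos h, List.foldl_cons]
        have hc : cur = [] := by simpa [List.isEmpty_iff] using h
        subst hc
        rw [show pvBstep vowels (b, pvEnc vowels []) c = (b, pvEnc vowels ([] : List Char)) by
              simp [pvBstep, hs, pvEnc]]
        exact ih [] b
      · rw [pvGo_cons_space c rest cur _ hs, if_neg h, List.foldl_cons]
        rw [show pvBstep vowels (b, pvEnc vowels cur) c
                = (pvMstep b (pvCnt vowels cur), pvEnc vowels ([] : List Char)) by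
              simp [pvBstep, hs, pvEnc, h, pvBmax_eq_mstep]]
        rw [ih [] (pvMstep b (pvCnt vowels cur))]
        rw [pvGo_acc rest [] [cur.reverse]]
        simp [pvCnt_reverse]
    · rw [pvGo_cons_nonspace c rest cur _ hs, List.foldl_cons]
      rw [show pvBstep vowels (b, pvEnc vowels cur) c = (b, pvEnc vowels (c :: cur)) by
            simp only [pvBstep, hs, if_false, Bool.false_eq_true, pvEnc]
            by_cases h : cur.isEmpty
            · have hc : cur = [] := by simpa [List.isEmpty_iff] using h
              subst hc
              simp [pvCnt, pvIsV]
            · simp [h, pvCnt_cons, pvIsV]]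
      exact ih (c :: cur) b

-- A's counts list is the map of pvCnt over the split words
lemma pvCountsA (text : String) (vowels : List String) :
    (PySem.Str.split₀ text).foldl (fun acc word =>
        acc ++ [word.toList.foldl (fun n letter =>
          if PySem.Str.upper (String.ofList [letter]) ∈ vowels then n + 1 else n) (0 : Int)]) []
      = (PySem.Chars.split₀ text.toList).map (pvCnt vowels) := by
  rw [PySem.List.foldl_append_singleton_eq_map]
  rw [show PySem.Str.split₀ text = (PySem.Chars.split₀ text.toList).map String.ofList from rfl]
  rw [List.map_map]
  apply List.map_congr_left
  intro w _
  simp only [Function.comp]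
  rw [show (String.ofList w).toList = w by simp]
  rw [PySem.List.foldl_ite_add_one (p := fun letter => PySem.Str.upper (String.ofList [letter]) ∈ vowels)]
  simp only [zero_add]
  rfl

-- ===== VERDICT (by name: the statement is the Claim_ definition above) =====
theorem max_vowels_1_spec : Claim_equal_max_vowels_1 := by
  intro text vowels _ _
  unfold Spec_max_vowels_1 max_vowels_1 max_vowels_1_alt
  rw [pvCountsA]
  have hB := pvMain vowels text.toList [] none
  have hmax : PySem.List.max? ((PySem.Chars.split₀ text.toList).map (pvCnt vowels)) (fun y => y)
      = ((PySem.Chars.split₀ text.toList).map (pvCnt vowels)).foldl pvMstep none := by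
    unfold PySem.List.max?
    apply PySem.List.foldl_congr_mem
    intro acc x _
    cases acc <;> simp [pvMstep]
  rw [hmax]
  rw [show PySem.Chars.split₀ text.toList = PySem.Chars.split₀.go text.toList [] [] from rfl]
  rw [← hB]
  rfl
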